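-- pv_equiv track=rewrite | github.com/surreallis/advanced-clash-launcher | code/numbers/topology.py | get_compounds
-- ===== SOURCE A (Python) =====
-- def get_compounds(matrix):
--     w = len(matrix[0])
--     h = len(matrix)
--     mc = [x[:] for x in matrix]
--     compounds = []
--     q = []
--     while True:
--         start = False
--         bb = False
--         for row in range(h):
--             for col in range(w):
--                 if not mc[row][col]:
--                     start = (row, col)
--                     bb = True
--                     break
--             if bb:
--                 break
--
--         if not start:
--             return compounds
--         current_compound = []
--         q.append(start)
--         while q:
--             v = q.pop()
--             if mc[v[0]][v[1]]:
--                 continue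
--             current_compound.append(v)
--             mc[v[0]][v[1]] = True
--             if v[0] > 0:
--                 q.append((v[0] - 1, v[1]))
--             if v[0] < h - 1:
--                 q.append((v[0] + 1, v[1]))
--             if v[1] > 0:
--                 q.append((v[0], v[1] - 1))
--             if v[1] < w - 1:
--                 q.append((v[0], v[1] + 1))
--         compounds.append(current_compound)
-- ===== SOURCE B (Python) =====
-- def get_compounds(matrix):
--     # One fused loop: a row-major scan pointer (i, j) and the flood-fill stack share
--     # a single while loop, so the grid is scanned once instead of rescanned from
--     # (0,0) after every component.
--     w = len(matrix[0])
--     h = len(matrix)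
--     mc = [row[:] for row in matrix]
--     compounds = []
--     stack = []
--     comp = []
--
--     def visit(r, c):
--         comp.append((r, c))
--         mc[r][c] = True
--         if r > 0:
--             stack.append((r - 1, c))
--         if r < h - 1:
--             stack.append((r + 1, c))
--         if c > 0:
--             stack.append((r, c - 1))
--         if c < w - 1:
--             stack.append((r, c + 1))
--
--     i = j = 0
--     while i < h:
--         if stack:
--             r, c = stack.pop()
--             if not mc[r][c]:
--                 visit(r, c)
--         elif j >= w:
--             i += 1
--             j = 0
--         elif mc[i][j]:
--             j += 1
--         else:
--             if comp:
--                 compounds.append(comp)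
--                 comp = []
--             visit(i, j)
--     if comp:
--         compounds.append(comp)
--     return compounds
-- ===== Notes on version B (the rewrite author's own statement) =====
-- stated objective: faster
-- what changed: A restarts a full O(w*h) rescan from (0,0) to find the next unvisited falsy cell after every flood fill; B fuses a single forward row-major scan pointer with the flood-fill stack into one while loop (with a visit helper), so each cell is scanned O(1) times.
import Mathlib
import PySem

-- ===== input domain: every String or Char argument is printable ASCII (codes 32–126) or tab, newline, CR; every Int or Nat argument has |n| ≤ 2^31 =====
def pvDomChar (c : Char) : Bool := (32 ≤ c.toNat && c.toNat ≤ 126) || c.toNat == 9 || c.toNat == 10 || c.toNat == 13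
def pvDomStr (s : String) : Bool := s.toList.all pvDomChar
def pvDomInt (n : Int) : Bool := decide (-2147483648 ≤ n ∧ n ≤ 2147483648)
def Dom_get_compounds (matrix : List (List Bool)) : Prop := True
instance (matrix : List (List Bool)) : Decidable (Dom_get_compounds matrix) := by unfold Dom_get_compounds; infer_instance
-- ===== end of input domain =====

-- B fuses a single forward row-major scan pointer with the flood-fill stack into one
-- while loop, replacing A's full rescan of the grid from (0,0) after every component.

-- ===== PORT A =====
-- cell read mc[i][j]: under Pre_ every index the programs use is in range; the `true` default
-- on an out-of-range read is never reached under Pre_.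
def getCell (mc : List (List Bool)) (i j : Int) : Bool :=
  (mc.getD i.toNat []).getD j.toNat true

-- cell write mc[i][j] = True (List.set is a no-op out of range, unreachable under Pre_)
def setCell (mc : List (List Bool)) (i j : Int) : List (List Bool) :=
  mc.set i.toNat ((mc.getD i.toNat []).set j.toNat true)

-- number of falsy cells: termination measure for the while-loops (not part of either Python)
def rowFalse : List Bool → Nat
  | [] => 0
  | b :: t => (if b then 0 else 1) + rowFalse t

def countFalse : List (List Bool) → Nat
  | [] => 0
  | r :: t => rowFalse r + countFalse t

theorem rowFalse_set_lt (row : List Bool) (q : Nat) (h : row.getD q true = false) :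
    rowFalse (row.set q true) < rowFalse row := by
  induction row generalizing q with
  | nil => simp at h
  | cons b t ih =>
    cases q with
    | zero => simp at h; simp [h, rowFalse]
    | succ q => simp at h; simpa [rowFalse] using ih q h

theorem countFalse_setCell_lt (mc : List (List Bool)) (i j : Int)
    (h : getCell mc i j = false) : countFalse (setCell mc i j) < countFalse mc := by
  unfold getCell at h
  unfold setCell
  generalize i.toNat = p at *
  generalize j.toNat = q at *
  induction mc generalizing p with
  | nil => simp at h
  | cons r t ih =>
    cases p with
    | zero => simpa [countFalse] using rowFalse_set_lt r q h
    | succ p => simpa [countFalse] using ih p h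

-- A's inner `while q:` loop: pop, skip if marked, record + mark, push the four guarded
-- neighbours (head of the list = top of the stack, so the pushes appear in reverse)
def dfsLoop (w h : Nat) (mc : List (List Bool)) (q : List (Int × Int)) (acc : List (Int × Int)) :
    List (Int × Int) × List (List Bool) :=
  match q with
  | [] => (acc, mc)
  | v :: q' =>
    if hcell : getCell mc v.1 v.2 then
      dfsLoop w h mc q' acc
    else
      dfsLoop w h (setCell mc v.1 v.2)
        ((if v.2 < (w : Int) - 1 then [(v.1, v.2 + 1)] else []) ++
         (if 0 < v.2 then [(v.1, v.2 - 1)] else []) ++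
         (if v.1 < (h : Int) - 1 then [(v.1 + 1, v.2)] else []) ++
         (if 0 < v.1 then [(v.1 - 1, v.2)] else []) ++ q')
        (acc ++ [v])
termination_by (countFalse mc, q.length)
decreasing_by
  · exact Prod.Lex.right (countFalse mc) (Nat.lt_succ_self q'.length)
  · exact Prod.Lex.left _ _ (countFalse_setCell_lt mc v.1 v.2 (Bool.not_eq_true _ ▸ hcell))

-- A's "find the first falsy cell": the `for col in range(w)` scan of one row …
def scanRow (row : List Bool) (w : Nat) (c : Nat) : Option Nat :=
  if c < w then
    if row.getD c true then scanRow row w (c + 1) else some c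
  else none
termination_by w - c
decreasing_by exact Nat.sub_succ_lt_self w c (by assumption)

-- … inside the `for row in range(h)` scan of the whole grid
def scanA (mc : List (List Bool)) (w h : Nat) (r : Nat) : Option (Int × Int) :=
  if r < h then
    match scanRow (mc.getD r []) w 0 with
    | some c => some ((r : Int), (c : Int))
    | none => scanA mc w h (r + 1)
  else none
termination_by h - r
decreasing_by exact Nat.sub_succ_lt_self h r (by assumption)

-- A's outer `while True:` loop: rescan the grid for the first falsy cell, flood fill from it.
-- `fuel` is a totality guard only: every flood fill marks at least one falsy cell, so
-- countFalse matrix + 1 steps always suffice (the 0 branch is never reached; proved below).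
def outerA (w h : Nat) (fuel : Nat) (mc : List (List Bool))
    (compounds : List (List (Int × Int))) : List (List (Int × Int)) :=
  match fuel with
  | 0 => compounds
  | fuel + 1 =>
    match scanA mc w h 0 with
    | none => compounds
    | some v =>
      let p := dfsLoop w h mc [v] []
      outerA w h fuel p.2 (compounds ++ [p.1])

-- w = len(matrix[0]) raises on []: excluded by Pre_; headD [] is the placeholder there
def get_compounds (matrix : List (List Bool)) : List (List (Int × Int)) :=
  outerA (matrix.headD []).length matrix.length (countFalse matrix + 1) matrix []

-- ===== PORT B =====
-- B's `visit(r, c)`: record the cell in the current component, mark it, push the four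
-- guarded neighbours (head of the list = top of the stack); returns (comp, mc, stack)
def visitB (w h : Nat) (mc : List (List Bool)) (stack comp : List (Int × Int)) (r c : Int) :
    List (Int × Int) × List (List Bool) × List (Int × Int) :=
  (comp ++ [(r, c)], setCell mc r c,
   (if c < (w : Int) - 1 then [(r, c + 1)] else []) ++
   (if 0 < c then [(r, c - 1)] else []) ++
   (if r < (h : Int) - 1 then [(r + 1, c)] else []) ++
   (if 0 < r then [(r - 1, c)] else []) ++ stack)

-- B's `if comp: compounds.append(comp)`
def flushC (compounds : List (List (Int × Int))) (comp : List (Int × Int)) :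
    List (List (Int × Int)) :=
  if comp = [] then compounds else compounds ++ [comp]

-- B's single fused `while i < h:` loop over the state (mc, stack, comp, compounds, i, j).
-- `fuel` is a totality guard only (as for outerA): every iteration strictly decreases the
-- measure 10*countFalse + stack.length + (w-j) + (h-i)*(w+1), so the fuel passed in
-- get_compounds_alt always suffices (the 0 branch is never reached; proved below).
def loopB (w h : Nat) (fuel : Nat) (mc : List (List Bool)) (stack comp : List (Int × Int))
    (compounds : List (List (Int × Int))) (i j : Nat) : List (List (Int × Int)) :=
  match fuel with
  | 0 => flushC compounds comp
  | fuel + 1 =>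
    if i < h then
      match stack with
      | v :: rest =>
        if getCell mc v.1 v.2 then loopB w h fuel mc rest comp compounds i j
        else
          let s := visitB w h mc rest comp v.1 v.2
          loopB w h fuel s.2.1 s.2.2 s.1 compounds i j
      | [] =>
        if j < w then
          if getCell mc (i : Int) (j : Int) then loopB w h fuel mc [] comp compounds i (j + 1)
          else
            let s := visitB w h mc [] [] (i : Int) (j : Int)
            loopB w h fuel s.2.1 s.2.2 s.1 (flushC compounds comp) i j
        else loopB w h fuel mc [] comp compounds (i + 1) 0
    else flushC compounds comp

def get_compounds_alt (matrix : List (List Bool)) : List (List (Int × Int)) :=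
  loopB (matrix.headD []).length matrix.length
    (10 * countFalse matrix + (matrix.headD []).length +
      matrix.length * ((matrix.headD []).length + 1) + 1)
    matrix [] [] [] 0 0

-- ===== PRECONDITION & SPEC =====
-- Pre_ excludes exactly the inputs on which Python A raises IndexError:
-- the empty matrix (matrix[0]) and matrices with a row shorter than the first row
-- (mc[row][col], col in range(w)).
def Pre_get_compounds (matrix : List (List Bool)) : Prop :=
  matrix ≠ [] ∧ ∀ row ∈ matrix, (matrix.headD []).length ≤ row.length
instance (matrix : List (List Bool)) : Decidable (Pre_get_compounds matrix) := by
  unfold Pre_get_compounds; infer_instance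

def pvWitness_get_compounds : List (List Bool) :=
  [[false, true, false], [true, false, false]]

def Spec_get_compounds (matrix : List (List Bool)) (out : List (List (Int × Int))) : Prop :=
  out = get_compounds_alt matrix
instance (matrix : List (List Bool)) (out : List (List (Int × Int))) :
    Decidable (Spec_get_compounds matrix out) := by unfold Spec_get_compounds; infer_instance

-- ===== CLAIM (what is proved, stated in full; the proofs are below) =====
def Claim_equal_get_compounds : Prop :=
  ∀ (matrix : List (List Bool)), Dom_get_compounds matrix → Pre_get_compounds matrix →
    Spec_get_compounds matrix (get_compounds matrix)

-- ===== LEMMAS AND PROOFS =====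

theorem dfsLoop_countFalse_le (w h : Nat) (mc : List (List Bool)) (q : List (Int × Int))
    (acc : List (Int × Int)) : countFalse (dfsLoop w h mc q acc).2 ≤ countFalse mc := by
  fun_induction dfsLoop with
  | case1 => simp
  | case2 mc acc v q' hcell ih => exact ih
  | case3 mc acc v q' hcell ih =>
    exact le_trans ih (le_of_lt (countFalse_setCell_lt mc v.1 v.2 (by simpa using hcell)))

theorem dfsLoop_countFalse_lt (w h : Nat) (mc : List (List Bool)) (v : Int × Int)
    (q : List (Int × Int)) (acc : List (Int × Int)) (hcell : getCell mc v.1 v.2 = false) :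
    countFalse (dfsLoop w h mc (v :: q) acc).2 < countFalse mc := by
  rw [dfsLoop]
  simp only [hcell, Bool.false_eq_true, dite_false]
  exact lt_of_le_of_lt (dfsLoop_countFalse_le _ _ _ _ _)
    (countFalse_setCell_lt mc v.1 v.2 hcell)

theorem dfsLoop_acc_prefix (w h : Nat) (mc : List (List Bool)) (q : List (Int × Int))
    (acc : List (Int × Int)) : ∃ t, (dfsLoop w h mc q acc).1 = acc ++ t := by
  fun_induction dfsLoop with
  | case1 => exact ⟨[], by simp⟩
  | case2 mc acc v q' hcell ih => exact ih
  | case3 mc acc v q' hcell ih =>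
    obtain ⟨t, ht⟩ := ih
    refine ⟨[v] ++ t, ?_⟩
    simp only [dite_eq_ite] at ht
    rw [ht]
    simp

theorem scanRow_some_false (row : List Bool) (w : Nat) (c c' : Nat)
    (hs : scanRow row w c = some c') : row.getD c' true = false := by
  revert hs
  fun_induction scanRow with
  | case1 c hlt hcell ih => exact ih
  | case2 c hlt hcell =>
    intro hs
    obtain rfl : c = c' := Option.some.inj hs
    simpa using hcell
  | case3 c hlt => intro hs; simp at hs

theorem scanRow_some_lt (row : List Bool) (w : Nat) (c c' : Nat)
    (hs : scanRow row w c = some c') : c' < w := by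
  revert hs
  fun_induction scanRow with
  | case1 c hlt hcell ih => exact ih
  | case2 c hlt hcell => intro hs; obtain rfl : c = c' := Option.some.inj hs; exact hlt
  | case3 c hlt => intro hs; simp at hs

theorem rowSet_true (l : List Bool) (q m : Nat) (h : l.getD m true = true) :
    (l.set q true).getD m true = true := by
  induction l generalizing q m with
  | nil => simpa using h
  | cons b t ih =>
    cases q with
    | zero => cases m with
      | zero => simp
      | succ m => simpa using h
    | succ q => cases m with
      | zero => simpa using h
      | succ m => simpa using ih q m (by simpa using h)

theorem getCell_setCell_true (mc : List (List Bool)) (i j x y : Int)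
    (h : getCell mc x y = true) : getCell (setCell mc i j) x y = true := by
  unfold getCell setCell at *
  generalize i.toNat = p at *
  generalize j.toNat = q at *
  generalize x.toNat = n at *
  generalize y.toNat = m at *
  induction mc generalizing p n with
  | nil => simpa using h
  | cons r t ih =>
    cases p with
    | zero => cases n with
      | zero => simpa using rowSet_true r q _ (by simpa using h)
      | succ n => simpa using h
    | succ p => cases n with
      | zero => simpa using h
      | succ n => simpa using ih p n (by simpa using h)

theorem dfsLoop_mono (w h : Nat) (mc : List (List Bool)) (q : List (Int × Int))
    (acc : List (Int × Int)) (x y : Int) (hx : getCell mc x y = true) :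
    getCell (dfsLoop w h mc q acc).2 x y = true := by
  fun_induction dfsLoop generalizing x y with
  | case1 => exact hx
  | case2 mc acc v q' hcell ih => exact ih x y hx
  | case3 mc acc v q' hcell ih => exact ih x y (getCell_setCell_true _ _ _ _ _ hx)

theorem scanRow_none (row : List Bool) (w : Nat) (c : Nat)
    (h : ∀ c', c ≤ c' → c' < w → row.getD c' true = true) : scanRow row w c = none := by
  revert h
  fun_induction scanRow with
  | case1 c hlt hcell ih => intro h; exact ih (fun c' h1 h2 => h c' (by omega) h2)
  | case2 c hlt hcell => intro h; exact absurd (h c le_rfl hlt) (by simpa using hcell)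
  | case3 c hlt => intro _; rfl

theorem scanA_none (mc : List (List Bool)) (w h : Nat) (r : Nat)
    (hall : ∀ r' c', r ≤ r' → r' < h → c' < w → getCell mc (r' : Int) (c' : Int) = true) :
    scanA mc w h r = none := by
  revert hall
  fun_induction scanA with
  | case1 r hlt c hrow =>
    intro hall
    have hc : c < w := scanRow_some_lt _ _ _ _ hrow
    have h3 := hall r c le_rfl hlt hc
    simp only [getCell, Int.toNat_natCast] at h3
    rw [scanRow_some_false _ _ _ _ hrow] at h3
    cases h3
  | case2 r hlt hrow ih => intro hall; exact ih (fun r' c' h1 h2 h3 => hall r' c' (by omega) h2 h3)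
  | case3 r hlt => intro _; rfl

theorem scanRow_some (row : List Bool) (w : Nat) (c0 c : Nat) (h0 : c0 ≤ c) (hc : c < w)
    (hpre : ∀ c', c0 ≤ c' → c' < c → row.getD c' true = true)
    (hcell : row.getD c true = false) : scanRow row w c0 = some c := by
  rcases Nat.eq_or_lt_of_le h0 with rfl | hlt
  · rw [scanRow.eq_def, if_pos hc, if_neg (by simp only [Bool.not_eq_true]; exact hcell)]
  · rw [scanRow.eq_def, if_pos (show c0 < w by omega), if_pos (hpre c0 le_rfl hlt)]
    exact scanRow_some row w (c0 + 1) c (by omega) hc (fun c' h1 h2 => hpre c' (by omega) h2) hcell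
termination_by c - c0

theorem scanA_some (mc : List (List Bool)) (w h : Nat) (r0 r c : Nat) (h0 : r0 ≤ r)
    (hr : r < h) (hc : c < w)
    (hrows : ∀ r' c', r0 ≤ r' → r' < r → c' < w → getCell mc (r' : Int) (c' : Int) = true)
    (hcols : ∀ c', c' < c → getCell mc (r : Int) (c' : Int) = true)
    (hcell : getCell mc (r : Int) (c : Int) = false) :
    scanA mc w h r0 = some ((r : Int), (c : Int)) := by
  rcases Nat.eq_or_lt_of_le h0 with rfl | hlt
  · rw [scanA.eq_def, if_pos hr]
    rw [scanRow_some (mc.getD r0 []) w 0 c (Nat.zero_le _) hc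
      (fun c' _ h2 => by
        have := hcols c' h2
        simpa only [getCell, Int.toNat_natCast] using this)
      (by simpa only [getCell, Int.toNat_natCast] using hcell)]
  · rw [scanA.eq_def, if_pos (show r0 < h by omega)]
    rw [scanRow_none (mc.getD r0 []) w 0
      (fun c' _ h2 => by
        have := hrows r0 c' le_rfl hlt h2
        simpa only [getCell, Int.toNat_natCast] using this)]
    exact scanA_some mc w h (r0 + 1) r c (by omega) hr hc
      (fun r' c' h1 h2 h3 => hrows r' c' (by omega) h2 h3) hcols hcell
termination_by r - r0

-- the while-loop measure of B's fused loop (proof-side only; loopB itself takes fuel)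
def measB (w h : Nat) (mc : List (List Bool)) (stack : List (Int × Int)) (i j : Nat) : Nat :=
  10 * countFalse mc + stack.length + (w - j) + (h - i) * (w + 1)

theorem measB_visit (w h : Nat) (mc : List (List Bool)) (st comp : List (Int × Int))
    (r c : Int) (i j : Nat) (hcell : getCell mc r c = false) :
    measB w h (visitB w h mc st comp r c).2.1 (visitB w h mc st comp r c).2.2 i j + 6 ≤
      measB w h mc st i j := by
  have h1 := countFalse_setCell_lt mc r c hcell
  have e1 : (if c < (w : Int) - 1 then [(r, c + 1)] else []).length ≤ 1 := by split <;> simp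
  have e2 : (if 0 < c then [(r, c - 1)] else []).length ≤ 1 := by split <;> simp
  have e3 : (if r < (h : Int) - 1 then [(r + 1, c)] else []).length ≤ 1 := by split <;> simp
  have e4 : (if 0 < r then [(r - 1, c)] else []).length ≤ 1 := by split <;> simp
  simp only [visitB, measB, List.length_append]
  omega

theorem measB_row (w h : Nat) (mc : List (List Bool)) (i j : Nat) (hi : i < h) :
    measB w h mc [] (i + 1) 0 < measB w h mc [] i j := by
  have e : (h - i) * (w + 1) = (h - (i + 1)) * (w + 1) + (w + 1) := by
    have e' : h - i = (h - (i + 1)) + 1 := by omega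
    rw [e', Nat.add_mul, Nat.one_mul]
  simp only [measB]
  omega

-- loopB returns the same value under any two sufficient fuels
theorem loopB_fuel (w h : Nat) :
    ∀ (f : Nat) (g : Nat) (mc : List (List Bool)) (stack comp : List (Int × Int))
      (compounds : List (List (Int × Int))) (i j : Nat),
      measB w h mc stack i j < f → measB w h mc stack i j < g →
      loopB w h f mc stack comp compounds i j = loopB w h g mc stack comp compounds i j := by
  intro f
  induction f with
  | zero => intro g mc stack comp compounds i j hf _; omega
  | succ f ih =>
    intro g mc stack comp compounds i j hf hg
    obtain ⟨g, rfl⟩ : ∃ g', g = g' + 1 := ⟨g - 1, by omega⟩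
    by_cases hi : i < h
    · match stack with
      | v :: rest =>
        rw [loopB, loopB]
        simp only [if_pos hi]
        cases hcell : getCell mc v.1 v.2 with
        | true =>
          exact ih g mc rest comp compounds i j
            (by simp only [measB, List.length_cons] at hf ⊢; omega)
            (by simp only [measB, List.length_cons] at hg ⊢; omega)
        | false =>
          simp only [Bool.false_eq_true]
          have hm := measB_visit w h mc rest comp v.1 v.2 i j hcell
          have hm' : measB w h mc rest i j + 1 = measB w h mc (v :: rest) i j := by
            simp only [measB, List.length_cons]; omega
          exact ih g _ _ _ compounds i j (by omega) (by omega)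
      | [] =>
        rw [loopB, loopB]
        simp only [if_pos hi]
        by_cases hj : j < w
        · simp only [if_pos hj]
          cases hcell : getCell mc (i : Int) (j : Int) with
          | true =>
            exact ih g mc [] comp compounds i (j + 1)
              (by simp only [measB] at hf ⊢; omega)
              (by simp only [measB] at hg ⊢; omega)
          | false =>
            simp only [Bool.false_eq_true]
            have hm := measB_visit w h mc [] [] (i : Int) (j : Int) i j hcell
            exact ih g _ _ _ (flushC compounds comp) i j (by omega) (by omega)
        · simp only [if_neg hj]
          have hm := measB_row w h mc i j hi
          exact ih g mc [] comp compounds (i + 1) 0 (by omega) (by omega)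
    · cases stack <;> (rw [loopB, loopB]; simp only [if_neg hi])

-- collapsing B's fused loop while the stack is nonempty: it performs exactly A's
-- inner flood fill (dfsLoop) and resumes the scan with an empty stack
theorem loopB_dfs (w h : Nat) (mc : List (List Bool)) (stack comp : List (Int × Int))
    (compounds : List (List (Int × Int))) (i j : Nat) :
    ∀ (f g : Nat), measB w h mc stack i j < f →
      measB w h (dfsLoop w h mc stack comp).2 [] i j < g → i < h →
      loopB w h f mc stack comp compounds i j =
        loopB w h g (dfsLoop w h mc stack comp).2 [] (dfsLoop w h mc stack comp).1
          compounds i j := by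
  fun_induction dfsLoop w h mc stack comp with
  | case1 mc acc =>
    intro f g hf hg hi
    exact loopB_fuel w h f g mc [] acc compounds i j hf hg
  | case2 mc acc v q' hcell ih =>
    intro f g hf hg hi
    obtain ⟨f, rfl⟩ : ∃ f', f = f' + 1 := ⟨f - 1, by omega⟩
    rw [loopB]
    simp only [if_pos hi, hcell]
    exact ih f g (by simp only [measB, List.length_cons] at hf ⊢; omega) hg hi
  | case3 mc acc v q' hcell ih =>
    intro f g hf hg hi
    obtain ⟨f, rfl⟩ : ∃ f', f = f' + 1 := ⟨f - 1, by omega⟩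
    rw [loopB]
    have hcell' : getCell mc v.1 v.2 = false := by simpa using hcell
    simp only [if_pos hi, hcell', Bool.false_eq_true, visitB]
    have hm := measB_visit w h mc q' acc v.1 v.2 i j hcell'
    have hm' : measB w h mc q' i j + 1 = measB w h mc (v :: q') i j := by
      simp only [measB, List.length_cons]; omega
    exact ih f g (by simpa only [visitB] using (by omega : measB w h
      (visitB w h mc q' acc v.1 v.2).2.1 (visitB w h mc q' acc v.1 v.2).2.2 i j < f)) hg hi

-- B's launch step (visit the seed with an empty stack) starts exactly A's flood fill
theorem loopB_start (w h f g : Nat) (mc : List (List Bool))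
    (compounds : List (List (Int × Int))) (i j : Nat) (r c : Int) (hi : i < h)
    (hcell : getCell mc r c = false)
    (hf : measB w h (visitB w h mc [] [] r c).2.1 (visitB w h mc [] [] r c).2.2 i j < f)
    (hg : measB w h (dfsLoop w h mc [(r, c)] []).2 [] i j < g) :
    loopB w h f (visitB w h mc [] [] r c).2.1 (visitB w h mc [] [] r c).2.2
        (visitB w h mc [] [] r c).1 compounds i j =
      loopB w h g (dfsLoop w h mc [(r, c)] []).2 [] (dfsLoop w h mc [(r, c)] []).1
        compounds i j := by
  rw [dfsLoop] at hg ⊢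
  simp only [hcell, Bool.false_eq_true, dite_false, visitB] at hg ⊢
  exact loopB_dfs w h _ _ _ compounds i j f g (by simpa only [visitB] using hf) hg hi

theorem outerA_eq_loopB (w h fuelA fuelB : Nat) (mc : List (List Bool)) (i j : Nat)
    (comp : List (Int × Int)) (compounds : List (List (Int × Int)))
    (hfA : countFalse mc < fuelA) (hfB : measB w h mc [] i j < fuelB)
    (hpre1 : ∀ r' c', r' < i → c' < w → getCell mc (r' : Int) (c' : Int) = true)
    (hpre2 : ∀ c', c' < j → getCell mc (i : Int) (c' : Int) = true) :
    outerA w h fuelA mc (flushC compounds comp) = loopB w h fuelB mc [] comp compounds i j := by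
  obtain ⟨fuelA, rfl⟩ : ∃ f, fuelA = f + 1 := ⟨fuelA - 1, by omega⟩
  obtain ⟨fuelB, rfl⟩ : ∃ g, fuelB = g + 1 := ⟨fuelB - 1, by omega⟩
  by_cases hi : i < h
  · by_cases hj : j < w
    · cases hcell : getCell mc (i : Int) (j : Int) with
      | true =>
        rw [loopB]
        simp only [if_pos hi, if_pos hj, hcell]
        exact outerA_eq_loopB w h (fuelA + 1) fuelB mc i (j + 1) comp compounds hfA
          (by simp only [measB] at hfB ⊢; omega) hpre1
          (fun c' h' => by
            rcases Nat.lt_succ_iff_lt_or_eq.mp h' with h'' | rfl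
            · exact hpre2 c' h''
            · exact hcell)
      | false =>
        have hscan : scanA mc w h 0 = some ((i : Int), (j : Int)) :=
          scanA_some mc w h 0 i j (Nat.zero_le _) hi hj
            (fun r' c' _ h2 h3 => hpre1 r' c' h2 h3) hpre2 hcell
        have hne : (dfsLoop w h mc [((i : Int), (j : Int))] []).1 ≠ [] := by
          rw [dfsLoop]
          simp only [hcell, Bool.false_eq_true, dite_false]
          obtain ⟨t, ht⟩ := dfsLoop_acc_prefix w h _ _ _
          rw [ht]; simp
        have hcf := dfsLoop_countFalse_lt w h mc ((i : Int), (j : Int)) [] [] hcell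
        have hmp : measB w h (dfsLoop w h mc [((i : Int), (j : Int))] []).2 [] i j < fuelB := by
          simp only [measB] at hfB ⊢; omega
        have hmv := measB_visit w h mc [] [] (i : Int) (j : Int) i j hcell
        have hrec := outerA_eq_loopB w h fuelA fuelB
            (dfsLoop w h mc [((i : Int), (j : Int))] []).2 i j
            (dfsLoop w h mc [((i : Int), (j : Int))] []).1 (flushC compounds comp)
            (by omega) hmp
            (fun r' c' h1 h2 => dfsLoop_mono _ _ _ _ _ _ _ (hpre1 r' c' h1 h2))
            (fun c' h' => dfsLoop_mono _ _ _ _ _ _ _ (hpre2 c' h'))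
        rw [flushC, if_neg hne] at hrec
        rw [outerA.eq_def]
        simp only [hscan]
        rw [loopB]
        simp only [if_pos hi, if_pos hj, hcell, Bool.false_eq_true]
        rw [loopB_start w h fuelB fuelB mc (flushC compounds comp) i j (i : Int) (j : Int)
          hi hcell (by omega) hmp]
        exact hrec
    · rw [loopB]
      simp only [if_pos hi, if_neg hj]
      have hm := measB_row w h mc i j hi
      exact outerA_eq_loopB w h (fuelA + 1) fuelB mc (i + 1) 0 comp compounds hfA (by omega)
        (fun r' c' h1 h2 => by
          rcases Nat.lt_succ_iff_lt_or_eq.mp h1 with h'' | rfl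
          · exact hpre1 r' c' h'' h2
          · exact hpre2 c' (by omega))
        (fun c' h' => absurd h' (by omega))
  · rw [loopB]
    simp only [if_neg hi]
    rw [outerA.eq_def]
    rw [scanA_none mc w h 0 (fun r' c' _ h2 h3 => hpre1 r' c' (by omega) h3)]
termination_by (countFalse mc, h - i, w - j)
decreasing_by
  all_goals first
  | (apply Prod.Lex.right; apply Prod.Lex.right; omega)
  | (apply Prod.Lex.right; apply Prod.Lex.left; omega)
  | (apply Prod.Lex.left
     exact dfsLoop_countFalse_lt _ _ _ _ [] [] (by assumption))

-- ===== VERDICT (by name: the statement is the Claim_ definition above) =====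
theorem get_compounds_spec : Claim_equal_get_compounds := by
  intro matrix _ _
  unfold Spec_get_compounds get_compounds get_compounds_alt
  rw [show ([] : List (List (Int × Int))) = flushC [] [] from rfl]
  exact outerA_eq_loopB _ _ _ _ matrix 0 0 [] [] (Nat.lt_succ_self _)
    (by simp only [measB, Nat.sub_zero, List.length_nil]; omega) (by omega) (by omega)
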